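-- pv_equiv track=rewrite | github.com/linhdvu14/cp-sols | sols/CodeForces/1730_d2/D_Prefixes_and_Suffixes.py | solve
-- ===== SOURCE A (Python) =====
-- def solve(N, A, B):
--     par = {}
--     for a, b in zip(A, B[::-1]):
--         if a > b: a, b = b, a
--         par[a, b] = par.get((a, b), 0) ^ 1
--
--     odd = sum(1 for v in par.values() if v == 1)
--     if odd == 0: return True
--     if odd > 1 or N % 2 == 0: return False
--
--     for (a, b), v in par.items():
--         if v == 1 and a == b:
--             return True
--
--     return False
-- ===== SOURCE B (Python) =====
-- def solve(N, A, B):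
--     pairs = sorted((a, b) if a <= b else (b, a) for a, b in zip(A, B[::-1]))
--     odd = []
--     i = 0
--     n = len(pairs)
--     while i < n:
--         j = i + 1
--         while j < n and pairs[j] == pairs[i]:
--             j += 1
--         if (j - i) % 2 == 1:
--             odd.append(pairs[i])
--         i = j
--     if not odd:
--         return True
--     if len(odd) > 1 or N % 2 == 0:
--         return False
--     a, b = odd[0]
--     return a == b
-- ===== Notes on version B (the rewrite author's own statement) =====
-- stated objective: alternative
-- what changed: Replaces A's hash-dict of xor-parities (plus a final scan over the dict's items) by sort-then-group counting: normalize each pair, sort the pair list, collect the pairs whose run length is odd in one grouping pass, and read the single odd pair off that list.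
import Mathlib
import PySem

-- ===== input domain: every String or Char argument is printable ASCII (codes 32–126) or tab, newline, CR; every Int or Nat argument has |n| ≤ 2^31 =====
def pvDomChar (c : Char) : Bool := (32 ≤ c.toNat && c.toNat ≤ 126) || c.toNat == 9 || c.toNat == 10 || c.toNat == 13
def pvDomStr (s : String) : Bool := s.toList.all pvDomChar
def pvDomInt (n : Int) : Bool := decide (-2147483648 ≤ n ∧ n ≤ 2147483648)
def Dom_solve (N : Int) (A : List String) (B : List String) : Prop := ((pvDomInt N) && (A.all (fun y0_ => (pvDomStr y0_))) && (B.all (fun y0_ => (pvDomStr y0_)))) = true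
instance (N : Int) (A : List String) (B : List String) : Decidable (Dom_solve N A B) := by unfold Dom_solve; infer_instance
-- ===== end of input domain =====

-- B replaces A's hash-dict of xor-parities by sort-then-group run counting over the normalized pairs; alternative structure, same result.

-- ===== PORT A =====
-- B[::-1] is B.reverse (PySem.List.slice?_none_none_neg_one); zip truncates like Python's zip.
def solve (N : Int) (A : List String) (B : List String) : Bool :=
  let par := (A.zip B.reverse).foldl
    (fun d ab =>
      let q := if ab.2 < ab.1 then (ab.2, ab.1) else ab   -- if a > b: a, b = b, a
      d.insert q (PySem.Int.bxor (d.getD q 0) 1))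
    (PySem.Dict.empty : PySem.Dict (String × String) Int)
  let odd : Int := ((par.values.filter (fun v => v == 1)).length : Int)
  if odd == 0 then true
  else if odd > 1 || PySem.Int.mod N 2 == 0 then false
  else par.items.any (fun kv => kv.2 == 1 && kv.1.1 == kv.1.2)

-- ===== PORT B =====
-- helper for B: the grouping while-loop over the sorted list = chunk recursion on the suffix
-- (outer while advances i to j; inner while scans the run of elements equal to pairs[i])
def runsOdd : List (String × String) → List (String × String)
  | [] => []
  | x :: xs =>
    let grp := xs.takeWhile (fun y => y == x)
    let rest := xs.dropWhile (fun y => y == x)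
    (if (grp.length + 1) % 2 == 1 then [x] else []) ++ runsOdd rest
termination_by l => l.length
decreasing_by
  exact Nat.lt_succ_of_le (List.dropWhile_sublist _).length_le

def solve_alt (N : Int) (A : List String) (B : List String) : Bool :=
  let pairs := PySem.List.sorted2
    ((A.zip B.reverse).map (fun ab => if ab.1 ≤ ab.2 then ab else (ab.2, ab.1)))
    Prod.fst Prod.snd false
  let odd := runsOdd pairs
  if odd.isEmpty then true
  else if odd.length > 1 || PySem.Int.mod N 2 == 0 then false
  else match PySem.List.pyGet? odd 0 with   -- odd[0]; guarded nonempty above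
       | some p => p.1 == p.2
       | none => false

-- ===== PRECONDITION & SPEC =====
def Spec_solve (N : Int) (A : List String) (B : List String) (out : Bool) : Prop := out = solve_alt N A B
instance (N : Int) (A : List String) (B : List String) (out : Bool) : Decidable (Spec_solve N A B out) := by unfold Spec_solve; infer_instance

-- ===== CLAIM (what is proved, stated in full; the proofs are below) =====
def Claim_equal_solve : Prop := ∀ (N : Int) (A : List String) (B : List String), Dom_solve N A B → Spec_solve N A B (solve N A B)

-- ===== LEMMAS AND PROOFS =====

-- A's xor-toggle dict: after folding, the stored value is the parity of the count.
lemma toggle (l : List (String × String)) (g : String × String → Bool)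
    (d : PySem.Dict (String × String) Int)
    (hd : ∀ q, d.getD q 0 = if g q then (1 : Int) else 0) (p : String × String) :
    (l.foldl (fun d q => d.insert q (PySem.Int.bxor (d.getD q 0) 1)) d).getD p 0
      = if (g p != decide (l.count p % 2 = 1)) then (1 : Int) else 0 := by
  induction l generalizing g d with
  | nil =>
    simp only [List.foldl_nil, List.count_nil]
    rw [hd p]; cases g p <;> simp
  | cons x t ih =>
    rw [List.foldl_cons]
    have hd' : ∀ q, (d.insert x (PySem.Int.bxor (d.getD x 0) 1)).getD q 0
        = if (if q = x then !(g q) else g q) then (1 : Int) else 0 := by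
      intro q
      rw [PySem.Dict.getD_insert]
      by_cases hq : q = x
      · subst hq
        rw [if_pos rfl, if_pos rfl, hd q]
        cases g q <;> decide
      · rw [if_neg hq, if_neg hq, hd q]
    rw [ih (fun q => if q = x then !(g q) else g q)
        (d.insert x (PySem.Int.bxor (d.getD x 0) 1)) hd']
    by_cases hp : p = x
    · subst hp
      rcases Nat.mod_two_eq_zero_or_one (t.count p) with h | h <;>
        cases hg : g p <;>
          simp [Nat.add_mod, h]
    · simp [hp, (Ne.symm hp : x ≠ p)]

-- the lexicographic tuple order Python's sort uses on the normalized pairs (sorted2's before-function)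
def ltlex (a b : String × String) : Bool :=
  decide (a.1 < b.1) || (!decide (b.1 < a.1) && decide (a.2 < b.2))

lemma ltlex_eq_true_iff (a b : String × String) :
    ltlex a b = true ↔ (a.1 < b.1 ∨ (a.1 = b.1 ∧ a.2 < b.2)) := by
  simp only [ltlex, Bool.or_eq_true, Bool.and_eq_true, Bool.not_eq_true',
    decide_eq_true_eq, decide_eq_false_iff_not]
  constructor
  · rintro (h | ⟨h1, h2⟩)
    · exact Or.inl h
    · rcases eq_or_lt_of_le (not_lt.mp h1) with he | hl
      · exact Or.inr ⟨he, h2⟩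
      · exact Or.inl hl
  · rintro (h | ⟨h1, h2⟩)
    · exact Or.inl h
    · exact Or.inr ⟨not_lt.mpr (le_of_eq h1), h2⟩

lemma ltlex_asymm {a b : String × String} (h : ltlex a b = true) : ltlex b a = false := by
  rw [ltlex_eq_true_iff] at h
  rw [Bool.eq_false_iff, Ne, ltlex_eq_true_iff]
  rintro (h' | ⟨h1', h2'⟩) <;> rcases h with h | ⟨h1, h2⟩
  · exact lt_asymm h h'
  · exact absurd h' (by rw [h1]; exact lt_irrefl _)
  · exact absurd h (by rw [h1']; exact lt_irrefl _)
  · exact lt_asymm h2 h2'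

lemma ltlex_trans {a b c : String × String} (hab : ltlex a b = true)
    (hbc : ltlex b c = true) : ltlex a c = true := by
  rw [ltlex_eq_true_iff] at hab hbc
  rw [ltlex_eq_true_iff]
  rcases hab with h | ⟨h1, h2⟩ <;> rcases hbc with h' | ⟨h1', h2'⟩
  · exact Or.inl (lt_trans h h')
  · exact Or.inl (h1' ▸ h)
  · exact Or.inl (by rw [h1]; exact h')
  · exact Or.inr ⟨h1.trans h1', lt_trans h2 h2'⟩

lemma ltlex_antisymm {a b : String × String} (hab : ltlex a b = false)
    (hba : ltlex b a = false) : a = b := by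
  rw [Bool.eq_false_iff, Ne, ltlex_eq_true_iff] at hab hba
  push Not at hab hba
  obtain ⟨h1, h2⟩ := hab
  obtain ⟨h1', h2'⟩ := hba
  have hf : a.1 = b.1 := le_antisymm (not_lt.mp h1') (not_lt.mp h1)
  have hs : a.2 = b.2 := le_antisymm (not_lt.mp (h2' hf.symm)) (not_lt.mp (h2 hf))
  exact Prod.ext hf hs

-- stable insertion keeps the list ordered by "not greater" (the order sorted2 produces)
lemma insertBy_pw (x : String × String) (ys : List (String × String))
    (h : ys.Pairwise (fun a b => ltlex b a = false)) :
    (PySem.List.insertBy ltlex x ys).Pairwise (fun a b => ltlex b a = false) := by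
  induction ys with
  | nil => simp [PySem.List.insertBy]
  | cons y t ih =>
    rcases h with _ | ⟨hy, ht⟩
    rw [PySem.List.insertBy]
    by_cases hxy : ltlex x y = true
    · rw [if_pos hxy]
      refine List.Pairwise.cons ?_ (List.Pairwise.cons hy ht)
      intro z hz
      rcases List.mem_cons.mp hz with rfl | hzt
      · exact ltlex_asymm hxy
      · rcases Bool.eq_false_or_eq_true (ltlex z x) with hzx | hzx
        · exact absurd (ltlex_trans hzx hxy) (by rw [hy z hzt]; simp)
        · exact hzx
    · rw [if_neg hxy]
      refine List.Pairwise.cons ?_ (ih ht)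
      intro z hz
      rcases (PySem.List.insertBy_mem_iff _ _ _ _).mp hz with rfl | hz
      · simpa using hxy
      · exact hy z hz

-- the sorted list is pairwise ordered
lemma sorted2_pw (L : List (String × String)) :
    (PySem.List.sorted2 L Prod.fst Prod.snd false).Pairwise
      (fun a b => ltlex b a = false) := by
  have hrw : PySem.List.sorted2 L Prod.fst Prod.snd false
      = L.foldl (fun acc x => PySem.List.insertBy ltlex x acc) [] := rfl
  rw [hrw]
  have key : ∀ (l : List (String × String)) (acc : List (String × String)),
      acc.Pairwise (fun a b => ltlex b a = false) →
      (l.foldl (fun acc x => PySem.List.insertBy ltlex x acc) acc).Pairwise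
        (fun a b => ltlex b a = false) := by
    intro l
    induction l with
    | nil => intro acc h; simpa using h
    | cons x t ih =>
      intro acc h
      exact ih _ (insertBy_pw x acc h)
  exact key L [] (by simp)

-- grouping runs of an ordered list collects exactly the elements of odd multiplicity, without duplicates
lemma runsOdd_spec (l : List (String × String))
    (h : l.Pairwise (fun a b => ltlex b a = false)) :
    (runsOdd l).Nodup ∧ ∀ z, z ∈ runsOdd l ↔ z ∈ l ∧ l.count z % 2 = 1 := by
  induction l using runsOdd.induct with
  | case1 => simp [runsOdd]
  | case2 x xs rest ih =>
    set grp := xs.takeWhile (fun y => y == x) with hgrpdef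
    have hsplit : grp ++ rest = xs := List.takeWhile_append_dropWhile
    have hgrp : ∀ y ∈ grp, y = x := by
      intro y hy
      have := List.mem_takeWhile_imp hy
      simpa using this
    have hrest_sub : rest.Sublist (x :: xs) :=
      (List.dropWhile_sublist _).trans (List.sublist_cons_self x xs)
    have hrest_pw : rest.Pairwise (fun a b => ltlex b a = false) :=
      List.Pairwise.sublist hrest_sub h
    have hxall : ∀ y ∈ xs, ltlex y x = false := by
      rcases h with _ | ⟨hx, _⟩
      exact hx
    have hxrest : x ∉ rest := by
      intro hx
      rcases hrest : rest with _ | ⟨y0, tr⟩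
      · rw [hrest] at hx; simp at hx
      · have hy0 : (y0 == x) = false := by
          have := List.head?_dropWhile_not (fun y => y == x) xs
          rw [show List.dropWhile (fun y => y == x) xs = rest from rfl, hrest] at this
          simpa using this
        have hy0x : y0 ≠ x := by simpa using hy0
        have hy0rest : y0 ∈ rest := by rw [hrest]; simp
        have hy0xs : y0 ∈ xs := List.Sublist.mem hy0rest (List.dropWhile_sublist _)
        rw [hrest] at hx
        rcases List.mem_cons.mp hx with heq | hx
        · exact hy0x heq.symm
        · have h1 : ltlex x y0 = false := by
            rw [hrest] at hrest_pw
            rcases hrest_pw with _ | ⟨hp, _⟩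
            exact hp x hx
          have h2 : ltlex y0 x = false := hxall y0 hy0xs
          exact hy0x (ltlex_antisymm h1 h2).symm
    have hcx : (x :: xs).count x = grp.length + 1 := by
      have hrest0 : rest.count x = 0 := List.count_eq_zero.mpr hxrest
      have hgcnt : grp.count x = grp.length :=
        List.count_eq_length.mpr (fun y hy => by rw [hgrp y hy])
      rw [← hsplit]
      simp [List.count_append, hrest0, hgcnt]
    have hcz : ∀ z, z ≠ x → (x :: xs).count z = rest.count z := by
      intro z hz
      have hg0 : grp.count z = 0 :=
        List.count_eq_zero.mpr (fun hzg => hz (hgrp z hzg))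
      rw [← hsplit]
      simp [List.count_append, hg0, Ne.symm hz]
    have hrw : runsOdd (x :: xs)
        = (if (grp.length + 1) % 2 == 1 then [x] else []) ++ runsOdd rest := by
      rw [runsOdd]
    obtain ⟨ihnd, ihmem⟩ := ih hrest_pw
    have hxro : x ∉ runsOdd rest := fun hx => hxrest ((ihmem x).mp hx).1
    constructor
    · rw [hrw]
      by_cases hp : ((grp.length + 1) % 2 == 1) = true
      · rw [if_pos hp]
        exact List.Nodup.cons hxro ihnd
      · rw [if_neg hp]
        simpa using ihnd
    · intro z
      rw [hrw, List.mem_append]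
      by_cases hzx : z = x
      · subst hzx
        by_cases hpar : ((grp.length + 1) % 2 == 1) = true
        · rw [if_pos hpar]
          constructor
          · intro _
            exact ⟨by simp, by rw [hcx]; simpa using hpar⟩
          · intro _
            exact Or.inl (by simp)
        · rw [if_neg hpar]
          constructor
          · rintro (hz | hz)
            · simp at hz
            · exact absurd ((ihmem _).mp hz).1 hxrest
          · rintro ⟨-, hodd⟩
            rw [hcx] at hodd
            exact absurd hodd (by simpa using hpar)
      · have hopt : z ∉ (if ((grp.length + 1) % 2 == 1) = true then [x] else []) := by
          split
          · simp [hzx]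
          · simp
        rw [ihmem z, hcz z hzx]
        constructor
        · rintro (hz | ⟨hzr, hodd⟩)
          · exact absurd hz hopt
          · exact ⟨List.mem_cons_of_mem _ (hsplit ▸ List.mem_append_right grp hzr), hodd⟩
        · rintro ⟨hzm, hodd⟩
          right
          refine ⟨?_, hodd⟩
          rcases List.mem_cons.mp hzm with heq | hzm
          · exact absurd heq hzx
          · rw [← hsplit] at hzm
            rcases List.mem_append.mp hzm with hzg | hzr
            · exact absurd (hgrp z hzg) hzx
            · exact hzr

-- ===== VERDICT (by name: the statement is the Claim_ definition above) =====
theorem solve_spec : Claim_equal_solve := by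
  intro N A B _
  unfold Spec_solve solve solve_alt
  generalize A.zip B.reverse = Z
  set L : List (String × String)
    := Z.map (fun ab => if ab.1 ≤ ab.2 then ab else (ab.2, ab.1)) with hL
  set C : String × String → Bool := fun p => L.count p % 2 == 1 with hC
  set O : List (String × String) := (PySem.Set.ofList L).filter C with hO
  -- A's fold over the raw zip is the toggle fold over the normalized list L
  have hfold : Z.foldl
      (fun d ab =>
        let q := if ab.2 < ab.1 then (ab.2, ab.1) else ab
        d.insert q (PySem.Int.bxor (d.getD q 0) 1))
      (PySem.Dict.empty : PySem.Dict (String × String) Int)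
    = L.foldl (fun d q => d.insert q (PySem.Int.bxor (d.getD q 0) 1))
        PySem.Dict.empty := by
    rw [hL, List.foldl_map]
    congr 1
    funext d ab
    by_cases h : ab.1 ≤ ab.2
    · rw [if_neg (not_lt.mpr h), if_pos h]
    · rw [if_pos (not_le.mp h), if_neg h]
  rw [hfold]
  set par := L.foldl (fun d q => d.insert q (PySem.Int.bxor (d.getD q 0) 1))
      (PySem.Dict.empty : PySem.Dict (String × String) Int) with hpar
  have hnd : par.keys.Nodup :=
    PySem.Dict.nodup_keys_foldl_insert _ _ _ PySem.Dict.nodup_keys_empty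
  have hkeys : par.keys = PySem.Set.ofList L := by
    rw [hpar, PySem.Dict.keys_foldl_insert, PySem.Dict.keys_empty]
    exact PySem.Set.update_nil_left L
  have hget : ∀ p, par.getD p 0 = if C p then (1 : Int) else 0 := by
    intro p
    rw [hpar, toggle L (fun _ => false) _ (fun q => by simp) p]
    simp [hC]
  have hodd : (List.filter (fun v => v == 1) par.values).length = O.length := by
    rw [PySem.Dict.values_eq_map_keys par hnd 0, hkeys, List.filter_map,
      List.length_map, hO]
    congr 1
    apply List.filter_congr
    intro k _
    simp only [Function.comp_apply]
    rw [hget k]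
    cases hc : C k <;> simp
  have hany : (par.items.any fun kv => kv.2 == 1 && kv.1.1 == kv.1.2)
      = O.any (fun k => k.1 == k.2) := by
    rw [PySem.Dict.items_eq_map_keys par hnd 0, List.any_map, hkeys, hO,
      List.any_filter]
    congr 1
    funext k
    simp only [Function.comp_apply]
    rw [hget k]
    cases hc : C k <;> simp
  -- B side: the sorted list and its odd-run groups
  set S : List (String × String)
    := PySem.List.sorted2 L Prod.fst Prod.snd false with hS
  have hSperm : S.Perm L := PySem.List.sorted2_perm L Prod.fst Prod.snd false
  obtain ⟨hO'nd, hO'mem⟩ := runsOdd_spec S (sorted2_pw L)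
  have hOmem : ∀ z, z ∈ O ↔ z ∈ L ∧ L.count z % 2 = 1 := by
    intro z
    rw [hO, List.mem_filter, PySem.Set.mem_ofList, hC]
    simp
  have hOnd : O.Nodup := by
    rw [hO]
    exact (PySem.Set.nodup_ofList L).filter _
  have hperm : O.Perm (runsOdd S) := by
    rw [List.perm_ext_iff_of_nodup hOnd hO'nd]
    intro z
    rw [hOmem z, hO'mem z, hSperm.mem_iff, hSperm.count_eq]
  have hlen : (runsOdd S).length = O.length := hperm.length_eq.symm
  simp only [hodd, hany]
  clear_value O S
  rcases O with _ | ⟨p0, t⟩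
  · rw [List.Perm.eq_nil hperm.symm]
    simp
  · have h0 : (((p0 :: t).length : Int) == 0) = false := by
      simp only [List.length_cons, beq_eq_false_iff_ne, ne_eq]
      omega
    have h1 : decide (((p0 :: t).length : Int) > 1) = decide ((runsOdd S).length > 1) := by
      rw [decide_eq_decide, hlen]
      simp only [List.length_cons]
      omega
    have hne : (runsOdd S).isEmpty = false := by
      rw [List.isEmpty_eq_false_iff_exists_mem]
      have : p0 ∈ runsOdd S := hperm.mem_iff.mp (by simp)
      exact ⟨p0, this⟩
    rw [h0, h1, hne]
    rcases t with _ | ⟨p1, t'⟩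
    · have hsing : runsOdd S = [p0] := List.perm_singleton.mp hperm.symm
      rw [hsing]
      cases hM : (PySem.Int.mod N 2 == 0) <;>
        simp [PySem.List.pyGet?, PySem.List.pyIdx?]
    · have hgt : decide ((runsOdd S).length > 1) = true := by
        rw [hlen]
        simp only [List.length_cons, decide_eq_true_eq]
        omega
      rw [hgt]
      simp
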